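-- pv_equiv track=rewrite | github.com/PLSE-Lab/Python-MLAPI-expl | python_sources/dsl-ensemble-0-96.py | get_rectified_kernel
-- ===== SOURCE A (Python) =====
-- def get_rectified_kernel(inp):
--     i = 0
--     j = 0
--     k = 0
--     mapping = {}
--     while i < len(inp):
--         j = 0
--         while j < len(inp[0]):
--             if inp[i][j] not in mapping:
--                 mapping[inp[i][j]] = k
--                 inp[i][j] = k
--                 k += 1
--             else:
--                 inp[i][j] = mapping[inp[i][j]]
--             j += 1
--         i += 1
--
--     return inp, mapping
-- ===== SOURCE B (Python) =====
-- def get_rectified_kernel(inp):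
--     # Two passes over the grid (width = len(inp[0])): first build the
--     # first-occurrence index of every value, then rewrite each cell through it.
--     # Mutates inp's rows in place.
--     mapping = {}
--     for row in inp:
--         for j in range(len(inp[0])):
--             mapping.setdefault(row[j], len(mapping))
--     for row in inp:
--         for j in range(len(inp[0])):
--             row[j] = mapping[row[j]]
--     return inp, mapping
-- ===== Notes on version B (the rewrite author's own statement) =====
-- stated objective: simpler
-- what changed: Replaces the interleaved index-arithmetic while-loops (mutating cells while building the mapping with an explicit counter k) by two clean for-passes: first build the first-occurrence mapping with dict.setdefault (value -> len(mapping)), then rewrite every cell through it.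
import Mathlib
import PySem

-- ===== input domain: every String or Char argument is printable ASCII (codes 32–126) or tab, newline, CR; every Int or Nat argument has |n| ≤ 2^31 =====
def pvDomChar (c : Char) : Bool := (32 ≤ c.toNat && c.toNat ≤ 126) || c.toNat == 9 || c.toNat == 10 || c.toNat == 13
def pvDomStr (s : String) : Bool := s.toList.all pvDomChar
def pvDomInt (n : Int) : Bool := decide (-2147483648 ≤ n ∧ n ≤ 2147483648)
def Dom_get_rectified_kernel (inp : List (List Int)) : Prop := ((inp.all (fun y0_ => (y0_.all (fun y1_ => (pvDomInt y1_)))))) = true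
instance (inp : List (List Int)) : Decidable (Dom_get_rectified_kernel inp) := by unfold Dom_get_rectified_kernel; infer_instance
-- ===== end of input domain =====

-- B replaces A's interleaved while-loops (mutate cells while building the mapping with a counter k)
-- by two clean passes: build the first-occurrence mapping with setdefault, then rewrite every cell.
-- Equivalence is about the RETURN value only — both Pythons mutate inp's rows in place.

-- ===== PORT A =====
-- inner while: process the first n cells of a row, relabelling in place
def pvA_row : Nat → List Int → PySem.Dict Int Int → Int → (List Int × PySem.Dict Int Int × Int)
  | 0, row, m, k => (row, m, k)
  | _ + 1, [], m, k => ([], m, k)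
  | n + 1, v :: rest, m, k =>
    match m.get? v with
    | none =>
        let r := pvA_row n rest (m.insert v k) (k + 1)
        (k :: r.1, r.2)
    | some x =>
        let r := pvA_row n rest m k
        (x :: r.1, r.2)

-- outer while over the rows, threading mapping and k
def pvA_rows (w : Nat) : List (List Int) → PySem.Dict Int Int → Int → (List (List Int) × PySem.Dict Int Int)
  | [], m, _ => ([], m)
  | row :: rs, m, k =>
      let r := pvA_row w row m k
      let rest := pvA_rows w rs r.2.1 r.2.2
      (r.1 :: rest.1, rest.2)

def get_rectified_kernel (inp : List (List Int)) : List (List Int) × (List (Int × Int)) :=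
  let w := (PySem.List.pyGetD inp 0 []).length   -- len(inp[0]); 0 when inp = [] (loop never reads it then)
  let r := pvA_rows w inp PySem.Dict.empty 0
  (r.1, r.2.items)

-- ===== PORT B =====
-- pass 1: mapping.setdefault(row[j], len(mapping)) for each cell, rows then j in range(w)
def pvB_pass1 (w : Nat) (inp : List (List Int)) : PySem.Dict Int Int :=
  inp.foldl (fun m row =>
    (List.range w).foldl (fun m (j : Nat) =>
      m.setdefault (PySem.List.pyGetD row (j : Int) 0) (Int.ofNat m.size)) m) PySem.Dict.empty

-- pass 2, one row: row[j] = mapping[row[j]] for j in range(w)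
def pvB_pass2row (w : Nat) (M : PySem.Dict Int Int) (row : List Int) : List Int :=
  (List.range w).foldl (fun r (j : Nat) =>
    PySem.List.pySetD r (j : Int) (M.getD (PySem.List.pyGetD r (j : Int) 0) 0)) row

def get_rectified_kernel_alt (inp : List (List Int)) : List (List Int) × (List (Int × Int)) :=
  let w := (inp.headD []).length   -- len(inp[0]); the row loops never read it when inp = []
  let m := pvB_pass1 w inp
  (inp.map (pvB_pass2row w m), m.items)

-- ===== PRECONDITION & SPEC =====
-- Pre_ excludes exactly the inputs on which Python A raises IndexError: ragged grids with some row shorter than the first row (Python B raises there too).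
def Pre_get_rectified_kernel (inp : List (List Int)) : Prop :=
  ∀ row ∈ inp, (inp.headD []).length ≤ row.length
instance (inp : List (List Int)) : Decidable (Pre_get_rectified_kernel inp) := by unfold Pre_get_rectified_kernel; infer_instance

def pvWitness_get_rectified_kernel : List (List Int) := [[1, 2], [2, 1]]

def Spec_get_rectified_kernel (inp : List (List Int)) (out : List (List Int) × (List (Int × Int))) : Prop := out = get_rectified_kernel_alt inp
instance (inp : List (List Int)) (out : List (List Int) × (List (Int × Int))) : Decidable (Spec_get_rectified_kernel inp out) := by unfold Spec_get_rectified_kernel; infer_instance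

-- ===== CLAIM (what is proved, stated in full; the proofs are below) =====
def Claim_equal_get_rectified_kernel : Prop := ∀ (inp : List (List Int)), Dom_get_rectified_kernel inp → Pre_get_rectified_kernel inp → Spec_get_rectified_kernel inp (get_rectified_kernel inp)

-- ===== LEMMAS AND PROOFS =====

-- the per-cell step of building the mapping (shared characterisation of both passes)
def pvStep (m : PySem.Dict Int Int) (v : Int) : PySem.Dict Int Int :=
  if m.contains v then m else m.insert v (Int.ofNat m.size)

theorem pvSetdefault_eq_pvStep (m : PySem.Dict Int Int) (v : Int) :
    m.setdefault v (Int.ofNat m.size) = pvStep m v := by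
  unfold pvStep
  cases hc : m.contains v with
  | true => simp [PySem.Dict.setdefault_of_contains, hc]
  | false => simp [PySem.Dict.setdefault_of_not_contains, hc]

-- ===== B-side characterisation =====

-- pass 1 over one row equals a pvStep-fold over the first w cells
theorem pvB_pass1_row (w : Nat) (row : List Int) (m0 : PySem.Dict Int Int) (h : w ≤ row.length) :
    (List.range w).foldl (fun m (j : Nat) =>
      m.setdefault (PySem.List.pyGetD row (j : Int) 0) (Int.ofNat m.size)) m0 =
    (row.take w).foldl pvStep m0 := by
  induction w generalizing m0 with
  | zero => simp
  | succ w ih =>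
    have hw : w < row.length := h
    have hrow : row.take (w + 1) = row.take w ++ [row[w]] := by
      rw [List.take_succ, List.getElem?_eq_getElem hw]; rfl
    rw [List.range_succ, List.foldl_append, hrow, List.foldl_append,
        ih _ (Nat.le_of_lt hw)]
    simp only [List.foldl_cons, List.foldl_nil]
    rw [PySem.List.pyGetD_natCast, List.getD_eq_getElem _ _ hw, pvSetdefault_eq_pvStep]

theorem pvB_pass1_eq (w : Nat) (inp : List (List Int)) (h : ∀ row ∈ inp, w ≤ row.length) :
    pvB_pass1 w inp = inp.foldl (fun m row => (row.take w).foldl pvStep m) PySem.Dict.empty := by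
  unfold pvB_pass1
  apply PySem.List.foldl_congr_mem
  intro m row hr
  exact pvB_pass1_row w row m (h row hr)

-- pass 2 over one row relabels the first w cells, leaving the tail untouched
theorem pvB_pass2row_eq (w : Nat) (M : PySem.Dict Int Int) (row : List Int) (h : w ≤ row.length) :
    pvB_pass2row w M row = (row.take w).map (fun v => M.getD v 0) ++ row.drop w := by
  unfold pvB_pass2row
  induction w with
  | zero => simp
  | succ w ih =>
    have hw : w < row.length := h
    rw [List.range_succ, List.foldl_append, ih (Nat.le_of_lt hw)]
    simp only [List.foldl_cons, List.foldl_nil, PySem.List.pyGetD_natCast, PySem.List.pySetD_natCast]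
    have hlenpre : (List.map (fun v => M.getD v 0) (List.take w row)).length = w := by
      simp [Nat.min_eq_left (Nat.le_of_lt hw), List.getElem?_eq_getElem hw]
    have hdrop : List.drop w row = row[w] :: List.drop (w + 1) row := List.drop_eq_getElem_cons hw
    have htake : List.take (w + 1) row = List.take w row ++ [row[w]] := by
      rw [List.take_succ, List.getElem?_eq_getElem hw]; rfl
    rw [hdrop]
    have hget : (List.map (fun v => M.getD v 0) (List.take w row) ++ row[w] :: List.drop (w + 1) row).getD w 0 = row[w] := by
      rw [List.getD_eq_getElem?_getD, List.getElem?_append_right (Nat.le_of_eq hlenpre)]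
      simp [Nat.min_eq_left (Nat.le_of_lt hw), List.getElem?_eq_getElem hw]
    rw [hget, List.set_append, hlenpre]
    simp only [Nat.lt_irrefl, if_false, Nat.sub_self, List.set_cons_zero]
    rw [htake, List.map_append]
    simp

-- ===== A-side characterisation =====

-- "every binding of m survives into M" (A only ever inserts fresh keys)
def pvSubD (m M : PySem.Dict Int Int) : Prop :=
  ∀ v x, m.get? v = some x → M.get? v = some x

theorem pvSubD_refl (m : PySem.Dict Int Int) : pvSubD m m := fun _ _ h => h

theorem pvSubD_trans {a b c : PySem.Dict Int Int} (h1 : pvSubD a b) (h2 : pvSubD b c) : pvSubD a c :=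
  fun v x h => h2 v x (h1 v x h)

theorem pvSubD_insert_fresh (m : PySem.Dict Int Int) (v : Int) (k : Int)
    (h : m.get? v = none) : pvSubD m (m.insert v k) := by
  intro u x hu
  rcases eq_or_ne u v with rfl | hne
  · simp [h] at hu
  · rwa [PySem.Dict.get?_insert_of_ne _ _ hne]

theorem pvSubD_row (n : Nat) (row : List Int) (m : PySem.Dict Int Int) (k : Int) :
    pvSubD m (pvA_row n row m k).2.1 := by
  induction n generalizing row m k with
  | zero => exact pvSubD_refl m
  | succ n ih =>
    cases row with
    | nil => exact pvSubD_refl m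
    | cons v rest =>
      simp only [pvA_row]
      cases h : m.get? v with
      | none => exact pvSubD_trans (pvSubD_insert_fresh m v k h) (ih rest _ _)
      | some x => exact ih rest m k

theorem pvSubD_rows (w : Nat) (rows : List (List Int)) (m : PySem.Dict Int Int) (k : Int) :
    pvSubD m (pvA_rows w rows m k).2 := by
  induction rows generalizing m k with
  | nil => exact pvSubD_refl m
  | cons row rs ih =>
    exact pvSubD_trans (pvSubD_row w row m k) (ih _ _)

-- the dict A threads equals a pvStep-fold over the first w cells, and k stays the size
theorem pvA_row_dict (n : Nat) (row : List Int) (m : PySem.Dict Int Int) :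
    (pvA_row n row m (Int.ofNat m.size)).2.1 = (row.take n).foldl pvStep m ∧
    (pvA_row n row m (Int.ofNat m.size)).2.2 = Int.ofNat ((row.take n).foldl pvStep m).size := by
  induction n generalizing row m with
  | zero => simp [pvA_row]
  | succ n ih =>
    cases row with
    | nil => simp [pvA_row]
    | cons v rest =>
      simp only [pvA_row, List.take_succ_cons, List.foldl_cons]
      cases h : m.get? v with
      | none =>
        have hc : m.contains v = false := by
          rw [PySem.Dict.contains_eq_isSome_get?, h]; rfl
        have hstep : pvStep m v = m.insert v (Int.ofNat m.size) := by simp [pvStep, hc]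
        have hsz : Int.ofNat m.size + 1 = Int.ofNat (m.insert v (Int.ofNat m.size)).size := by
          rw [PySem.Dict.size_insert]
          simp [hc]
        rw [hstep, hsz]
        exact ih rest (m.insert v (Int.ofNat m.size))
      | some x =>
        have hc : m.contains v = true := by
          rw [PySem.Dict.contains_eq_isSome_get?, h]; rfl
        have hstep : pvStep m v = m := by simp [pvStep, hc]
        rw [hstep]
        exact ih rest m

theorem pvA_rows_dict (w : Nat) (rows : List (List Int)) (m : PySem.Dict Int Int) :
    (pvA_rows w rows m (Int.ofNat m.size)).2 =
      rows.foldl (fun m row => (row.take w).foldl pvStep m) m := by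
  induction rows generalizing m with
  | nil => rfl
  | cons row rs ih =>
    simp only [pvA_rows, List.foldl_cons]
    rcases pvA_row_dict w row m with ⟨h1, h2⟩
    rw [h1, h2]
    exact ih _

-- the values A writes are final-dict lookups
theorem pvA_row_fst (n : Nat) (row : List Int) (m : PySem.Dict Int Int) (k : Int)
    (M : PySem.Dict Int Int) (hM : pvSubD (pvA_row n row m k).2.1 M) :
    (pvA_row n row m k).1 = (row.take n).map (fun v => M.getD v 0) ++ row.drop n := by
  induction n generalizing row m k with
  | zero => simp [pvA_row]
  | succ n ih =>
    cases row with
    | nil => simp [pvA_row]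
    | cons v rest =>
      simp only [pvA_row, List.take_succ_cons, List.drop_succ_cons, List.map_cons, List.cons_append]
      simp only [pvA_row] at hM
      cases h : m.get? v with
      | none =>
        simp only [h] at hM ⊢
        have hv : M.get? v = some k := by
          apply hM
          exact pvSubD_row n rest _ _ v k (PySem.Dict.get?_insert_self _ _ _)
        rw [PySem.Dict.getD_eq_get?_getD, hv]
        exact congrArg (k :: ·) (ih rest _ _ hM)
      | some x =>
        simp only [h] at hM ⊢
        have hv : M.get? v = some x := by
          apply hM
          exact pvSubD_row n rest m k v x h
        rw [PySem.Dict.getD_eq_get?_getD, hv]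
        exact congrArg (x :: ·) (ih rest _ _ hM)

theorem pvA_rows_fst (w : Nat) (rows : List (List Int)) (m : PySem.Dict Int Int) (k : Int)
    (M : PySem.Dict Int Int) (hM : pvSubD (pvA_rows w rows m k).2 M) :
    (pvA_rows w rows m k).1 =
      rows.map (fun row => (row.take w).map (fun v => M.getD v 0) ++ row.drop w) := by
  induction rows generalizing m k with
  | nil => rfl
  | cons row rs ih =>
    simp only [pvA_rows, List.map_cons] at hM ⊢
    have hRowM : pvSubD (pvA_row w row m k).2.1 M :=
      pvSubD_trans (pvSubD_rows w rs _ _) hM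
    rw [pvA_row_fst w row m k M hRowM, ih _ _ hM]

-- ===== VERDICT (by name: the statement is the Claim_ definition above) =====
theorem get_rectified_kernel_spec : Claim_equal_get_rectified_kernel := by
  intro inp _ hpre
  unfold Spec_get_rectified_kernel get_rectified_kernel get_rectified_kernel_alt
  have hw : (PySem.List.pyGetD inp 0 []).length = (inp.headD []).length := by
    cases inp <;> simp [PySem.List.pyGetD_zero]
  set w := (inp.headD []).length with hwdef
  have hdict : (pvA_rows w inp PySem.Dict.empty 0).2 = pvB_pass1 w inp := by
    rw [pvB_pass1_eq w inp hpre]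
    exact pvA_rows_dict w inp PySem.Dict.empty
  have hfst := pvA_rows_fst w inp PySem.Dict.empty 0 _
    (pvSubD_refl ((pvA_rows w inp PySem.Dict.empty 0).2))
  simp only [hw, Prod.mk.injEq]
  constructor
  · rw [hfst, hdict]
    apply List.map_congr_left
    intro row hr
    exact (pvB_pass2row_eq w (pvB_pass1 w inp) row (hpre row hr)).symm
  · rw [hdict]
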